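-- pv_equiv track=rewrite | github.com/eden-cheng/veh_concrete | parser_tool/lib_para_parser.py | func_dic
-- ===== SOURCE A (Python) =====
-- def func_dic(string):
--     key = ''
--     temp = ''
--     dic = {}
--     for i in string:
--         if i == ":" or i == "：":
--             key = temp
--             temp = ''
--             continue
--         temp += i
--     dic[key] = temp
--     return dic
-- ===== SOURCE B (Python) =====
-- def func_dic(string):
--     # Scan the reversed string: the value is everything after the last colon,
--     # the key is the segment between the last two colons ('' if fewer colons).
--     rev = string[::-1]
--     n = len(rev)
--     k = 0
--     value = []
--     while k < n and rev[k] != ':' and rev[k] != '：':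
--         value.append(rev[k])
--         k += 1
--     k += 1  # skip the colon (harmless past the end)
--     key = []
--     while k < n and rev[k] != ':' and rev[k] != '：':
--         key.append(rev[k])
--         k += 1
--     return {''.join(reversed(key)): ''.join(reversed(value))}
-- ===== Notes on version B (the rewrite author's own statement) =====
-- stated objective: alternative
-- what changed: A makes one left-to-right pass growing key/temp string accumulators; B scans the reversed string and stops after the second colon from the right, reading only the key and value segments.
import Mathlib
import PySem

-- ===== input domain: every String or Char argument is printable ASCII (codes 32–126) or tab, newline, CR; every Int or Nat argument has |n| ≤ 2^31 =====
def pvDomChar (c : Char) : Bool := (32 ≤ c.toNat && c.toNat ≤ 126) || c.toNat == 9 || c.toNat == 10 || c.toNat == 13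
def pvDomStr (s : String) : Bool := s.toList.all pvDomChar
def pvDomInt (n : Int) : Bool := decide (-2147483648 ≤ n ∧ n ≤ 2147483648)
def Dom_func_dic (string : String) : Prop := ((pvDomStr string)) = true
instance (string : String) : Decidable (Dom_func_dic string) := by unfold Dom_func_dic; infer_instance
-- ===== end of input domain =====

-- B replaces A's single forward pass with accumulators by a backward scan that
-- takes the value and key segments from the reversed string (alternative decomposition).

-- ===== PORT A =====
-- state = (key, temp) as char lists; the final dict is one insertion into {}
def func_dic (string : String) : List (String × String) :=
  let st := string.toList.foldl
    (fun (s : List Char × List Char) i =>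
      if i = ':' ∨ i = '：' then (s.2, ([] : List Char)) else (s.1, s.2 ++ [i]))
    (([] : List Char), ([] : List Char))
  (PySem.Dict.empty.insert (String.ofList st.1) (String.ofList st.2)).items

-- ===== PORT B =====
-- the while loop "collect chars until a colon, then skip it": returns the
-- collected segment (in scan order) and the remainder after the colon
def pvSeg (cs : List Char) : List Char × List Char :=
  match cs with
  | [] => ([], [])
  | c :: rest =>
    if c = ':' ∨ c = '：' then ([], rest)
    else
      let p := pvSeg rest
      (c :: p.1, p.2)

def func_dic_alt (string : String) : List (String × String) :=
  let rev := string.toList.reverse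
  let v := pvSeg rev
  let k := pvSeg v.2
  [(String.ofList k.1.reverse, String.ofList v.1.reverse)]

-- ===== PRECONDITION & SPEC =====
def Spec_func_dic (string : String) (out : List (String × String)) : Prop := out = func_dic_alt string
instance (string : String) (out : List (String × String)) : Decidable (Spec_func_dic string out) := by unfold Spec_func_dic; infer_instance

-- ===== CLAIM (what is proved, stated in full; the proofs are below) =====
def Claim_equal_func_dic : Prop := ∀ (string : String), Dom_func_dic string → Spec_func_dic string (func_dic string)

-- ===== LEMMAS AND PROOFS =====

-- the loop invariant: A's fold from ([],[]) computes exactly B's two reversed segments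
theorem pv_fold_eq_seg (cs : List Char) :
    cs.foldl
      (fun (s : List Char × List Char) i =>
        if i = ':' ∨ i = '：' then (s.2, ([] : List Char)) else (s.1, s.2 ++ [i]))
      (([] : List Char), ([] : List Char))
    = ((pvSeg (pvSeg cs.reverse).2).1.reverse, (pvSeg cs.reverse).1.reverse) := by
  induction cs using List.reverseRecOn with
  | nil => simp [pvSeg]
  | append_singleton ds c ih =>
    rw [List.foldl_append, ih]
    by_cases hc : c = ':' ∨ c = '：' <;>
      simp [hc, pvSeg, List.foldl]

-- ===== VERDICT (by name: the statement is the Claim_ definition above) =====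
theorem func_dic_spec : Claim_equal_func_dic := by
  intro s _
  unfold Spec_func_dic func_dic func_dic_alt
  rw [pv_fold_eq_seg]
  simp [PySem.Dict.empty, PySem.Dict.insert]
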